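-- pv_equiv track=rewrite | github.com/borealBytes/dokploy-wizard | src/dokploy_wizard/dokploy/nextcloud.py | _platform_version_spec_matches_major
-- ===== SOURCE A (Python) =====
-- def _platform_version_spec_matches_major(platform_spec: str, nextcloud_major: int) -> bool:
--     normalized = platform_spec.replace(",", " ")
--     clauses = [clause.strip() for clause in normalized.split() if clause.strip() != ""]
--     if not clauses:
--         return False
--     return all(
--         _platform_version_clause_matches_major(clause, nextcloud_major) for clause in clauses
--     )
--
-- def _platform_version_clause_matches_major(clause: str, nextcloud_major: int) -> bool:
--     for operator in (">=", "<=", ">", "<", "==", "="):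
--         if not clause.startswith(operator):
--             continue
--         version_major = _parse_version_major(clause[len(operator) :].strip())
--         if version_major is None:
--             return False
--         if operator == ">=":
--             return nextcloud_major >= version_major
--         if operator == "<=":
--             return nextcloud_major <= version_major
--         if operator == ">":
--             return nextcloud_major > version_major
--         if operator == "<":
--             return nextcloud_major < version_major
--         return nextcloud_major == version_major
--     version_major = _parse_version_major(clause)
--     return version_major is not None and nextcloud_major == version_major
--
-- def _parse_version_major(value: str) -> int | None:
--     major_text = value.strip().split(".", 1)[0]
--     if major_text.isdigit():
--         return int(major_text)
--     return None
-- ===== SOURCE B (Python) =====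
-- # B: interval-intersection algorithm — each clause is compiled (first-character
-- # dispatch) into integer bounds, all bounds are intersected into one [lo, hi]
-- # window, and the answer is a single membership test of nextcloud_major in it
-- # (no per-clause boolean fold).
--
--
-- def _major(text):
--     """Major version: digits up to the first '.', or None."""
--     head = text.split(".", 1)[0]
--     return int(head) if head.isdigit() else None
--
--
-- def _clause_bounds(clause):
--     """(lo, hi) bounds implied by one clause (None = unbounded), or None if unparsable."""
--     i, strict, kind = 0, False, "="
--     if clause and clause[0] in "<>=":
--         kind = clause[0]
--         i = 1
--         if len(clause) > 1 and clause[1] == "=":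
--             i = 2
--         elif kind != "=":
--             strict = True
--     v = _major(clause[i:])
--     if v is None:
--         return None
--     if kind == ">":
--         return (v + 1 if strict else v, None)
--     if kind == "<":
--         return (None, v - 1 if strict else v)
--     return (v, v)
--
--
-- def _platform_version_spec_matches_major(platform_spec: str, nextcloud_major: int) -> bool:
--     lo = hi = None
--     tokens = platform_spec.replace(",", " ").split()
--     if not tokens:
--         return False
--     for clause in tokens:
--         b = _clause_bounds(clause)
--         if b is None:
--             return False
--         clo, chi = b
--         if clo is not None and (lo is None or clo > lo):
--             lo = clo
--         if chi is not None and (hi is None or chi < hi):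
--             hi = chi
--     return (lo is None or nextcloud_major >= lo) and (hi is None or nextcloud_major <= hi)
-- ===== Notes on version B (the rewrite author's own statement) =====
-- stated objective: alternative
-- what changed: A evaluates every clause as a boolean (ordered operator-prefix scan, parse, compare) and all()s them; B instead compiles each clause into integer interval bounds via first-character dispatch and a char-by-char digit scan, intersects all bounds into one [lo, hi] window, and answers with a single membership test of nextcloud_major.
import Mathlib
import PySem

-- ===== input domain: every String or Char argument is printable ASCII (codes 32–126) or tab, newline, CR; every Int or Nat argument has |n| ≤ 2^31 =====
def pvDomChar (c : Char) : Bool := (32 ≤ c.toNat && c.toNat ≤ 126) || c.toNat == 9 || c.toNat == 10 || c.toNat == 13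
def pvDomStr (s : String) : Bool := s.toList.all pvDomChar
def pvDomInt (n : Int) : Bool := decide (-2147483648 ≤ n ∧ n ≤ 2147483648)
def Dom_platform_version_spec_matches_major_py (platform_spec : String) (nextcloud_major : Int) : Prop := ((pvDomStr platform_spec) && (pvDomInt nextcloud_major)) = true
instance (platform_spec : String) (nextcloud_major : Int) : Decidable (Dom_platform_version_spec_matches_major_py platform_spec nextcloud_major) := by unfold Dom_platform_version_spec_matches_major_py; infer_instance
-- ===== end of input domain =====

-- B replaces A's per-clause boolean fold (ordered operator-prefix scan + all()) with an
-- interval-intersection algorithm: clauses become [lo, hi] bounds, intersected once,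
-- and the result is a single membership test; objective: alternative.

-- ===== PORT A =====
-- _parse_version_major; `int(major_text)` ported as PySem.Int.ofChars?, exact here
-- because strIsdigit majorText = true guarantees int() succeeds with that value.
def pvA_parseVersionMajor (value : List Char) : Option Int :=
  let majorText := ((PySem.Chars.splitMax? (PySem.Chars.strip value) ['.'] 1).getD []).headD []
  if PySem.Chars.strIsdigit majorText then PySem.Int.ofChars? majorText else none

-- the for-loop of _platform_version_clause_matches_major, one constructor per iteration
def pvA_clauseLoop (ops : List (List Char)) (clause : List Char) (m : Int) : Bool :=
  match ops with
  | [] =>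
    match pvA_parseVersionMajor clause with
    | some v => m == v
    | none => false
  | op :: rest =>
    if PySem.Chars.startswith clause op then
      match pvA_parseVersionMajor (PySem.Chars.strip (PySem.List.slice clause (some (op.length : Int)) none)) with
      | none => false
      | some v =>
        if op = ['>', '='] then decide (m ≥ v)
        else if op = ['<', '='] then decide (m ≤ v)
        else if op = ['>'] then decide (m > v)
        else if op = ['<'] then decide (m < v)
        else m == v
    else pvA_clauseLoop rest clause m

def pvA_clauseMatches (clause : List Char) (m : Int) : Bool :=
  pvA_clauseLoop [['>', '='], ['<', '='], ['>'], ['<'], ['=', '='], ['=']] clause m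

def platform_version_spec_matches_major_py (platform_spec : String) (nextcloud_major : Int) : Bool :=
  let normalized := PySem.Chars.replace platform_spec.toList [','] [' ']
  let clauses := (PySem.Chars.split₀ normalized).filterMap
      (fun c => if PySem.Chars.strip c ≠ [] then some (PySem.Chars.strip c) else none)
  if clauses.isEmpty then false
  else clauses.all (fun c => pvA_clauseMatches c nextcloud_major)

-- ===== PORT B =====
-- _major; `int(head)` ported as PySem.Int.ofChars?, exact under strIsdigit = true
def pvB_major (text : List Char) : Option Int :=
  let head := ((PySem.Chars.splitMax? text ['.'] 1).getD []).headD []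
  if PySem.Chars.strIsdigit head then PySem.Int.ofChars? head else none

-- _clause_bounds; `clause[0] in "<>="` is the three-way character disjunction
def pvB_clauseBounds (clause : List Char) : Option (Option Int × Option Int) :=
  let t : Nat × Bool × Char :=
    match clause with
    | [] => (0, false, '=')
    | c :: rest =>
      if c = '<' ∨ c = '>' ∨ c = '=' then
        match rest with
        | d :: _ => if d = '=' then (2, false, c) else (1, decide (c ≠ '='), c)
        | [] => (1, decide (c ≠ '='), c)
      else (0, false, '=')
  match pvB_major (PySem.List.slice clause (some (t.1 : Int)) none) with
  | none => none
  | some v =>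
    if t.2.2 = '>' then some (some (if t.2.1 then v + 1 else v), none)
    else if t.2.2 = '<' then some (none, some (if t.2.1 then v - 1 else v))
    else some (some v, some v)

-- the two bound-narrowing statements of the loop body
def pvB_updLo (lo clo : Option Int) : Option Int :=
  match clo with
  | none => lo
  | some v => match lo with
    | none => some v
    | some l => if v > l then some v else lo

def pvB_updHi (hi chi : Option Int) : Option Int :=
  match chi with
  | none => hi
  | some v => match hi with
    | none => some v
    | some h => if v < h then some v else hi

-- the for-loop over tokens; the [] case is the final return's membership test
def pvB_loop (toks : List (List Char)) (lo hi : Option Int) (m : Int) : Bool :=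
  match toks with
  | [] =>
    (match lo with | none => true | some l => decide (m ≥ l))
      && (match hi with | none => true | some h => decide (m ≤ h))
  | c :: rest =>
    match pvB_clauseBounds c with
    | none => false
    | some (clo, chi) => pvB_loop rest (pvB_updLo lo clo) (pvB_updHi hi chi) m

def platform_version_spec_matches_major_py_alt (platform_spec : String) (nextcloud_major : Int) : Bool :=
  let tokens := PySem.Chars.split₀ (PySem.Chars.replace platform_spec.toList [','] [' '])
  if tokens.isEmpty then false
  else pvB_loop tokens none none nextcloud_major

-- ===== PRECONDITION & SPEC =====
def Spec_platform_version_spec_matches_major_py (platform_spec : String) (nextcloud_major : Int) (out : Bool) : Prop := out = platform_version_spec_matches_major_py_alt platform_spec nextcloud_major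
instance (platform_spec : String) (nextcloud_major : Int) (out : Bool) : Decidable (Spec_platform_version_spec_matches_major_py platform_spec nextcloud_major out) := by unfold Spec_platform_version_spec_matches_major_py; infer_instance

-- ===== CLAIM (what is proved, stated in full; the proofs are below) =====
def Claim_equal_platform_version_spec_matches_major_py : Prop := ∀ (platform_spec : String) (nextcloud_major : Int), Dom_platform_version_spec_matches_major_py platform_spec nextcloud_major → Spec_platform_version_spec_matches_major_py platform_spec nextcloud_major (platform_version_spec_matches_major_py platform_spec nextcloud_major)

-- ===== LEMMAS AND PROOFS =====

-- every token produced by Python's whitespace split() is nonempty and whitespace-free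
theorem split₀_go_tokens (s : List Char) (cur : List Char) (acc : List (List Char))
    (hacc : ∀ t ∈ acc, t ≠ [] ∧ ∀ c ∈ t, PySem.Chars.isspace c = false)
    (hcur : ∀ c ∈ cur, PySem.Chars.isspace c = false) :
    ∀ t ∈ PySem.Chars.split₀.go s cur acc, t ≠ [] ∧ ∀ c ∈ t, PySem.Chars.isspace c = false := by
  induction s generalizing cur acc with
  | nil =>
    intro t ht
    unfold PySem.Chars.split₀.go at ht
    by_cases hc : cur.isEmpty
    · simp [hc] at ht; exact hacc t ht
    · simp [hc] at ht
      rcases ht with h | h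
      · exact hacc t h
      · subst h
        refine ⟨by simpa [List.isEmpty_iff] using hc, ?_⟩
        intro c hcm; exact hcur c (List.mem_reverse.mp hcm)
  | cons c rest ih =>
    intro t ht
    unfold PySem.Chars.split₀.go at ht
    by_cases hs : PySem.Chars.isspace c
    · by_cases hc : cur.isEmpty
      · simp [hs, hc] at ht
        exact ih [] acc hacc (by simp) t ht
      · simp [hs, hc] at ht
        refine ih [] (cur.reverse :: acc) ?_ (by simp) t ht
        intro u hu
        rcases List.mem_cons.mp hu with h | h
        · subst h
          refine ⟨by simpa [List.isEmpty_iff] using hc, ?_⟩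
          intro d hd; exact hcur d (List.mem_reverse.mp hd)
        · exact hacc u h
    · simp [hs] at ht
      refine ih (c :: cur) acc hacc ?_ t ht
      intro d hd
      rcases List.mem_cons.mp hd with h | h
      · subst h; simpa using hs
      · exact hcur d h

theorem split₀_tokens (s : List Char) :
    ∀ t ∈ PySem.Chars.split₀ s, t ≠ [] ∧ ∀ c ∈ t, PySem.Chars.isspace c = false := by
  unfold PySem.Chars.split₀
  exact split₀_go_tokens s [] [] (by simp) (by simp)

theorem dropWhile_isspace_self (l : List Char)
    (h : ∀ c ∈ l, PySem.Chars.isspace c = false) :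
    List.dropWhile PySem.Chars.isspace l = l := by
  cases l with
  | nil => rfl
  | cons a l => simp [List.dropWhile, h a (by simp)]

theorem strip_self (l : List Char)
    (h : ∀ c ∈ l, PySem.Chars.isspace c = false) :
    PySem.Chars.strip l = l := by
  unfold PySem.Chars.strip PySem.Chars.lstrip PySem.Chars.rstrip
  rw [dropWhile_isspace_self l h, dropWhile_isspace_self l.reverse
    (by intro c hc; exact h c (List.mem_reverse.mp hc))]
  simp

-- A's strip-and-filter comprehension is the identity on split() tokens
theorem filterMap_strip_id (l : List (List Char))
    (h : ∀ c ∈ l, c ≠ [] ∧ ∀ ch ∈ c, PySem.Chars.isspace ch = false) :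
    l.filterMap (fun c => if PySem.Chars.strip c ≠ [] then some (PySem.Chars.strip c) else none) = l := by
  induction l with
  | nil => rfl
  | cons a l ih =>
    obtain ⟨hne, hws⟩ := h a (by simp)
    have hs : PySem.Chars.strip a = a := strip_self a hws
    simp only [List.filterMap_cons, hs, if_pos hne]
    rw [ih (fun c hc => h c (by simp [hc]))]

-- on a whitespace-free argument A's parse and B's parse coincide (the extra strip vanishes)
theorem parse_eq_major (cs : List Char)
    (h : ∀ c ∈ cs, PySem.Chars.isspace c = false) :
    pvA_parseVersionMajor cs = pvB_major cs := by
  unfold pvA_parseVersionMajor pvB_major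
  rw [strip_self cs h]

theorem startswith_ne_head (a b : Char) (t p : List Char) (h : a ≠ b) :
    PySem.Chars.startswith (a :: t) (b :: p) = false := by
  rw [Bool.eq_false_iff]
  intro hc
  have := (PySem.Chars.startswith_iff _ _).mp hc
  rw [List.cons_prefix_cons] at this
  exact h this.1.symm

theorem startswith_cons_self (a : Char) (t : List Char) :
    PySem.Chars.startswith (a :: t) [a] = true :=
  (PySem.Chars.startswith_iff _ _).mpr (by simp)

theorem startswith_cons₂_self (a b : Char) (t : List Char) :
    PySem.Chars.startswith (a :: b :: t) [a, b] = true :=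
  (PySem.Chars.startswith_iff _ _).mpr (by simp [List.cons_prefix_cons])

theorem startswith_cons₂_ne (a b c : Char) (t : List Char) (h : b ≠ c) :
    PySem.Chars.startswith (a :: b :: t) [a, c] = false := by
  rw [Bool.eq_false_iff]
  intro hc
  have := (PySem.Chars.startswith_iff _ _).mp hc
  rw [List.cons_prefix_cons, List.cons_prefix_cons] at this
  exact h this.2.1.symm

-- how a clause's truth value under A reads off B's bounds
def pvInLo (lo : Option Int) (m : Int) : Bool :=
  match lo with | none => true | some l => decide (m ≥ l)

def pvInHi (hi : Option Int) (m : Int) : Bool :=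
  match hi with | none => true | some h => decide (m ≤ h)

def pvEvalBounds (b : Option (Option Int × Option Int)) (m : Int) : Bool :=
  match b with
  | none => false
  | some (lo, hi) => pvInLo lo m && pvInHi hi m

-- per-clause: A's inline operator scan equals the membership test of B's bounds
theorem clause_eq (cs : List Char) (m : Int)
    (h : ∀ c ∈ cs, PySem.Chars.isspace c = false) :
    pvA_clauseMatches cs m = pvEvalBounds (pvB_clauseBounds cs) m := by
  cases cs with
  | nil =>
    have hA : pvA_clauseMatches [] m = false := rfl
    have hB : pvB_clauseBounds [] = none := by decide
    rw [hA, hB]; rfl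
  | cons a rest =>
    have hslice : ∀ n : Nat, PySem.List.slice (a :: rest) (some (n : Int)) none = (a :: rest).drop n :=
      fun n => by rw [PySem.List.slice_from _ (by positivity)]; simp
    by_cases hgt : a = '>'
    · subst hgt
      cases rest with
      | nil =>
        have hA : pvA_clauseMatches ['>'] m = false := rfl
        have hB : pvB_clauseBounds ['>'] = none := by decide
        rw [hA, hB]; rfl
      | cons b rest2 =>
        by_cases hbe : b = '='
        · subst hbe
          simp only [pvA_clauseMatches, pvA_clauseLoop,
            startswith_cons₂_self,
            Bool.false_eq_true, if_false, if_true, pvB_clauseBounds, hslice, List.drop]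
          simp only [List.length_cons, List.length_nil, Nat.reduceAdd, Char.reduceEq,
            true_or, or_true, false_or, or_false, if_true, if_false, reduceIte,
            decide_true, decide_false, List.drop_succ_cons, List.drop_zero, Bool.false_eq_true]
          have hws : ∀ c ∈ rest2, PySem.Chars.isspace c = false := by
            intro c hc; exact h c (by simp [hc])
          rw [strip_self _ hws, parse_eq_major _ hws]
          cases hb : pvB_major (rest2) with
          | none => simp [pvEvalBounds, hb]
          | some v =>
            simp [pvEvalBounds, pvInLo, pvInHi, hb]
        · -- clause ">x…", strict
          simp only [pvA_clauseMatches, pvA_clauseLoop,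
            startswith_cons₂_ne '>' b '=' rest2 hbe,
            startswith_ne_head '>' '<' _ _ (by decide), startswith_cons_self,
            Bool.false_eq_true, if_false, if_true, pvB_clauseBounds, hslice, List.drop, if_neg hbe, if_pos (show ('>':Char) = '<' ∨ ('>':Char) = '>' ∨ ('>':Char) = '=' from by tauto)]
          simp only [List.length_cons, List.length_nil, Nat.reduceAdd, Char.reduceEq,
            true_or, or_true, false_or, or_false, if_true, if_false, reduceIte,
            decide_true, decide_false, List.drop_succ_cons, List.drop_zero, Bool.false_eq_true]
          have hws : ∀ c ∈ b :: rest2, PySem.Chars.isspace c = false := by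
            intro c hc; exact h c (by simp [hc])
          rw [strip_self _ hws, parse_eq_major _ hws]
          cases hb : pvB_major (b :: rest2) with
          | none => simp [pvEvalBounds, hb]
          | some v =>
            simp [pvEvalBounds, pvInLo, pvInHi, hb]
    · by_cases hlt : a = '<'
      · subst hlt
        cases rest with
        | nil =>
          have hA : pvA_clauseMatches ['<'] m = false := rfl
          have hB : pvB_clauseBounds ['<'] = none := by decide
          rw [hA, hB]; rfl
        | cons b rest2 =>
          by_cases hbe : b = '='
          · subst hbe
            simp only [pvA_clauseMatches, pvA_clauseLoop,
              startswith_cons₂_self,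
              startswith_ne_head '<' '>' _ _ (by decide),
              Bool.false_eq_true, if_false, if_true, pvB_clauseBounds, hslice, List.drop]
            simp only [List.length_cons, List.length_nil, Nat.reduceAdd, Char.reduceEq,
              true_or, or_true, false_or, or_false, if_true, if_false, reduceIte,
              decide_true, decide_false, List.drop_succ_cons, List.drop_zero, Bool.false_eq_true]
            have hws : ∀ c ∈ rest2, PySem.Chars.isspace c = false := by
              intro c hc; exact h c (by simp [hc])
            rw [strip_self _ hws, parse_eq_major _ hws]
            cases hb : pvB_major (rest2) with
            | none => simp [pvEvalBounds, hb]
            | some v =>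
              simp [pvEvalBounds, pvInLo, pvInHi, hb]
          · -- clause "<x…", strict
            simp only [pvA_clauseMatches, pvA_clauseLoop,
              startswith_cons₂_ne '<' b '=' rest2 hbe,
              startswith_ne_head '<' '>' _ _ (by decide), startswith_cons_self,
              Bool.false_eq_true, if_false, if_true, pvB_clauseBounds, hslice, List.drop, if_neg hbe, if_pos (show ('<':Char) = '<' ∨ ('<':Char) = '>' ∨ ('<':Char) = '=' from by tauto)]
            simp only [List.length_cons, List.length_nil, Nat.reduceAdd, Char.reduceEq,
              true_or, or_true, false_or, or_false, if_true, if_false, reduceIte,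
              decide_true, decide_false, List.drop_succ_cons, List.drop_zero, Bool.false_eq_true]
            have hws : ∀ c ∈ b :: rest2, PySem.Chars.isspace c = false := by
              intro c hc; exact h c (by simp [hc])
            rw [strip_self _ hws, parse_eq_major _ hws]
            cases hb : pvB_major (b :: rest2) with
            | none => simp [pvEvalBounds, hb]
            | some v =>
              simp [pvEvalBounds, pvInLo, pvInHi, hb]
      · by_cases heq : a = '='
        · subst heq
          cases rest with
          | nil =>
            have hA : pvA_clauseMatches ['='] m = false := rfl
            have hB : pvB_clauseBounds ['='] = none := by decide
            rw [hA, hB]; rfl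
          | cons b rest2 =>
            by_cases hbe : b = '='
            · subst hbe
              simp only [pvA_clauseMatches, pvA_clauseLoop,
                startswith_cons₂_self,
                startswith_ne_head '=' '>' _ _ (by decide),
                startswith_ne_head '=' '<' _ _ (by decide),
                Bool.false_eq_true, if_false, if_true, pvB_clauseBounds, hslice, List.drop]
              simp only [List.length_cons, List.length_nil, Nat.reduceAdd, Char.reduceEq,
                true_or, or_true, false_or, or_false, if_true, if_false, reduceIte,
                decide_true, decide_false, List.drop_succ_cons, List.drop_zero, Bool.false_eq_true]
              have hws : ∀ c ∈ rest2, PySem.Chars.isspace c = false := by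
                intro c hc; exact h c (by simp [hc])
              rw [strip_self _ hws, parse_eq_major _ hws]
              cases hb : pvB_major (rest2) with
              | none => simp [pvEvalBounds, hb]
              | some v =>
                simp [pvEvalBounds, pvInLo, pvInHi, hb]
                rw [Bool.eq_iff_iff]
                simp only [Bool.and_eq_true, beq_iff_eq, decide_eq_true_eq]
                omega
            · -- clause "=x…"
              simp only [pvA_clauseMatches, pvA_clauseLoop,
                startswith_cons₂_ne '=' b '=' rest2 hbe,
                startswith_ne_head '=' '>' _ _ (by decide),
                startswith_ne_head '=' '<' _ _ (by decide), startswith_cons_self,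
                Bool.false_eq_true, if_false, if_true, pvB_clauseBounds, hslice, List.drop, if_neg hbe, if_pos (show ('=':Char) = '<' ∨ ('=':Char) = '>' ∨ ('=':Char) = '=' from by tauto)]
              simp only [List.length_cons, List.length_nil, Nat.reduceAdd, Char.reduceEq,
                true_or, or_true, false_or, or_false, if_true, if_false, reduceIte,
                decide_true, decide_false, List.drop_succ_cons, List.drop_zero, Bool.false_eq_true]
              have hws : ∀ c ∈ b :: rest2, PySem.Chars.isspace c = false := by
                intro c hc; exact h c (by simp [hc])
              rw [strip_self _ hws, parse_eq_major _ hws]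
              cases hb : pvB_major (b :: rest2) with
              | none => simp [pvEvalBounds, hb]
              | some v =>
                simp [pvEvalBounds, pvInLo, pvInHi, hb]
                rw [Bool.eq_iff_iff]
                simp only [Bool.and_eq_true, beq_iff_eq, decide_eq_true_eq]
                omega
        · -- bare clause: no operator character in front
          simp only [pvA_clauseMatches, pvA_clauseLoop,
            startswith_ne_head a '>' _ _ hgt,
            startswith_ne_head a '<' _ _ hlt,
            startswith_ne_head a '=' _ _ heq, Bool.false_eq_true, if_false,
            pvB_clauseBounds, if_neg (by tauto : ¬ (a = '<' ∨ a = '>' ∨ a = '=')),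
            hslice, List.drop]
          rw [parse_eq_major _ h]
          cases hb : pvB_major (a :: rest) with
          | none => simp [pvEvalBounds, hb]
          | some v =>
            simp [pvEvalBounds, pvInLo, pvInHi, hb]
            rw [Bool.eq_iff_iff]
            simp only [Bool.and_eq_true, beq_iff_eq, decide_eq_true_eq]
            omega

-- narrowing a bound is conjunction of the membership tests
theorem inLo_upd (lo clo : Option Int) (m : Int) :
    pvInLo (pvB_updLo lo clo) m = (pvInLo lo m && pvInLo clo m) := by
  cases clo <;> cases lo <;>
    simp [pvB_updLo, pvInLo] <;> split_ifs <;> simp <;> omega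

theorem inHi_upd (hi chi : Option Int) (m : Int) :
    pvInHi (pvB_updHi hi chi) m = (pvInHi hi m && pvInHi chi m) := by
  cases chi <;> cases hi <;>
    simp [pvB_updHi, pvInHi] <;> split_ifs <;> simp <;> omega

-- the loop invariant: B's fold over tokens is the conjunction of A's clause tests
theorem loop_eq_all (toks : List (List Char)) (lo hi : Option Int) (m : Int)
    (h : ∀ t ∈ toks, ∀ c ∈ t, PySem.Chars.isspace c = false) :
    pvB_loop toks lo hi m
      = ((pvInLo lo m && pvInHi hi m) && toks.all (fun c => pvA_clauseMatches c m)) := by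
  induction toks generalizing lo hi with
  | nil => simp [pvB_loop, pvInLo, pvInHi]
  | cons c rest ih =>
    have hc := clause_eq c m (h c (by simp))
    rw [pvB_loop]
    cases hb : pvB_clauseBounds c with
    | none =>
      simp [List.all_cons, hc, pvEvalBounds, hb]
    | some p =>
      obtain ⟨clo, chi⟩ := p
      dsimp only
      rw [ih _ _ (fun t ht => h t (by simp [ht]))]
      simp only [List.all_cons, hc, pvEvalBounds, hb, inLo_upd, inHi_upd]
      cases pvInLo lo m <;> cases pvInHi hi m <;> cases pvInLo clo m <;> cases pvInHi chi m <;>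
        simp

-- ===== VERDICT (by name: the statement is the Claim_ definition above) =====
theorem platform_version_spec_matches_major_py_spec : Claim_equal_platform_version_spec_matches_major_py := by
  intro s m _
  unfold Spec_platform_version_spec_matches_major_py
  unfold platform_version_spec_matches_major_py platform_version_spec_matches_major_py_alt
  dsimp only []
  rw [filterMap_strip_id _ (split₀_tokens (PySem.Chars.replace s.toList [','] [' ']))]
  rw [loop_eq_all _ none none m
    (fun t ht => (split₀_tokens (PySem.Chars.replace s.toList [','] [' ']) t ht).2)]
  simp [pvInLo, pvInHi]
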